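-- pv_equiv track=rewrite | github.com/taofineberg/netbox-helper | netbox_site_sync.py | _expand_dependencies
-- ===== SOURCE A (Python) =====
-- from typing import Any, Callable, Dict, List, Optional, Set, Tuple
--
-- SITE_GROUP_ORDER = [
--     'sites',
--     'locations',
--     'racks',
--     'power-panels',
--     'devices',
--     'power-feeds',
--     'modules',
--     'cables',
--     'power-cables',
--     'vrf',
--     'prefixroles',
--     'prefix',
--     'ip-addresses',
-- ]
--
-- GROUP_DEPENDENCIES = {
--     'sites': [],
--     'locations': ['sites'],
--     'racks': ['sites', 'locations'],
--     'power-panels': ['sites'],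
--     'devices': ['sites', 'locations', 'racks'],
--     'power-feeds': ['sites', 'racks', 'power-panels'],
--     'modules': ['devices'],
--     'cables': ['devices', 'modules'],
--     'power-cables': ['devices', 'modules', 'power-feeds'],
--     'vrf': [],
--     'prefixroles': [],
--     'prefix': ['sites', 'vrf', 'prefixroles'],
--     'ip-addresses': ['devices', 'prefix'],
-- }
--
-- def _expand_dependencies(groups: List[str]) -> Tuple[List[str], List[str]]:
--     expanded = set(groups)
--     dependency_only = set()
--
--     changed = True
--     while changed:
--         changed = False
--         for group in list(expanded):
--             for dep in GROUP_DEPENDENCIES.get(group, []):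
--                 if dep not in expanded:
--                     expanded.add(dep)
--                     dependency_only.add(dep)
--                     changed = True
--
--     ordered_expanded = [g for g in SITE_GROUP_ORDER if g in expanded]
--     ordered_dep_only = [g for g in SITE_GROUP_ORDER if g in dependency_only and g not in groups]
--     return ordered_expanded, ordered_dep_only
-- ===== SOURCE B (Python) =====
-- from typing import List, Tuple
--
-- SITE_GROUP_ORDER = [
--     'sites',
--     'locations',
--     'racks',
--     'power-panels',
--     'devices',
--     'power-feeds',
--     'modules',
--     'cables',
--     'power-cables',
--     'vrf',
--     'prefixroles',
--     'prefix',
--     'ip-addresses',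
-- ]
--
-- GROUP_DEPENDENCIES = {
--     'sites': [],
--     'locations': ['sites'],
--     'racks': ['sites', 'locations'],
--     'power-panels': ['sites'],
--     'devices': ['sites', 'locations', 'racks'],
--     'power-feeds': ['sites', 'racks', 'power-panels'],
--     'modules': ['devices'],
--     'cables': ['devices', 'modules'],
--     'power-cables': ['devices', 'modules', 'power-feeds'],
--     'vrf': [],
--     'prefixroles': [],
--     'prefix': ['sites', 'vrf', 'prefixroles'],
--     'ip-addresses': ['devices', 'prefix'],
-- }
--
-- def _expand_dependencies(groups: List[str]) -> Tuple[List[str], List[str]]: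
--     expanded = set(groups)
--     added = []
--     stack = list(groups)
--     while stack:
--         node = stack.pop()
--         for dep in GROUP_DEPENDENCIES.get(node, []):
--             if dep not in expanded:
--                 expanded.add(dep)
--                 added.append(dep)
--                 stack.append(dep)
--     ordered_expanded = [g for g in SITE_GROUP_ORDER if g in expanded]
--     ordered_dep_only = [g for g in SITE_GROUP_ORDER if g in added and g not in groups]
--     return ordered_expanded, ordered_dep_only
-- ===== Notes on version B (the rewrite author's own statement) =====
-- stated objective: alternative
-- what changed: Replaces A's fixed-point 'while changed' re-scans of the whole expanded set with a single-visit worklist (stack) that pushes each newly discovered dependency exactly once.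
import Mathlib
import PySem

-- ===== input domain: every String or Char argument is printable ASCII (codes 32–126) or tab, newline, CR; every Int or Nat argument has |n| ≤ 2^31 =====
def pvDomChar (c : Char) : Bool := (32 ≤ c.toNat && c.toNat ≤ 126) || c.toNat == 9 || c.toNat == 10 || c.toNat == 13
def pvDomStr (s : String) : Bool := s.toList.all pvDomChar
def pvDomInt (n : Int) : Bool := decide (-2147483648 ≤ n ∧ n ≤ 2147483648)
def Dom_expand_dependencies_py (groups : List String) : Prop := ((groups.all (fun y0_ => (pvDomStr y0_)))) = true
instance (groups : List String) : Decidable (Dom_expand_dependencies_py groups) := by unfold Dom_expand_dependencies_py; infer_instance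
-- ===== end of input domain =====

-- B replaces A's fixed-point "while changed" re-scans with a single-visit worklist (stack); alternative, same results.


-- ===== PORT A =====
-- module constant SITE_GROUP_ORDER
def pvORDER : List String :=
  ["sites", "locations", "racks", "power-panels", "devices", "power-feeds", "modules",
   "cables", "power-cables", "vrf", "prefixroles", "prefix", "ip-addresses"]

-- module constant GROUP_DEPENDENCIES
def pvDEPS : PySem.Dict String (List String) :=
  PySem.Dict.ofList
    [("sites", []), ("locations", ["sites"]), ("racks", ["sites", "locations"]),
     ("power-panels", ["sites"]), ("devices", ["sites", "locations", "racks"]),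
     ("power-feeds", ["sites", "racks", "power-panels"]), ("modules", ["devices"]),
     ("cables", ["devices", "modules"]), ("power-cables", ["devices", "modules", "power-feeds"]),
     ("vrf", []), ("prefixroles", []), ("prefix", ["sites", "vrf", "prefixroles"]),
     ("ip-addresses", ["devices", "prefix"])]

-- GROUP_DEPENDENCIES.get(g, [])
def pvDeps (g : String) : List String := PySem.Dict.getD pvDEPS g []

-- every dependency named in GROUP_DEPENDENCIES is one of the 13 known group names
lemma pvDeps_subset_order (g d : String) (h : d ∈ pvDeps g) : d ∈ pvORDER := by
  unfold pvDeps at h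
  rw [PySem.Dict.getD_eq_get?_getD] at h
  cases hf : PySem.Dict.get? pvDEPS g with
  | none => rw [hf] at h; simp at h
  | some v =>
    rw [hf] at h
    simp only [Option.getD_some] at h
    have hm := PySem.Dict.mem_items_of_get?_eq_some _ hf
    have hit : pvDEPS.items = [("sites", []), ("locations", ["sites"]), ("racks", ["sites", "locations"]),
     ("power-panels", ["sites"]), ("devices", ["sites", "locations", "racks"]),
     ("power-feeds", ["sites", "racks", "power-panels"]), ("modules", ["devices"]),
     ("cables", ["devices", "modules"]), ("power-cables", ["devices", "modules", "power-feeds"]),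
     ("vrf", []), ("prefixroles", []), ("prefix", ["sites", "vrf", "prefixroles"]),
     ("ip-addresses", ["devices", "prefix"])] := by decide
    rw [hit] at hm
    simp only [List.mem_cons, List.not_mem_nil, or_false, Prod.mk.injEq] at hm
    rcases hm with ⟨-,hv⟩|⟨-,hv⟩|⟨-,hv⟩|⟨-,hv⟩|⟨-,hv⟩|⟨-,hv⟩|⟨-,hv⟩|⟨-,hv⟩|⟨-,hv⟩|⟨-,hv⟩|⟨-,hv⟩|⟨-,hv⟩|⟨-,hv⟩ <;>
      subst hv <;> simp_all [pvORDER] <;> tauto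

-- length of a filter shrinks when the predicate weakens pointwise on the list …
lemma pvFilterLenLe (l : List String) (p q : String → Bool)
    (h : ∀ x ∈ l, q x = true → p x = true) :
    (l.filter q).length ≤ (l.filter p).length := by
  induction l with
  | nil => simp
  | cons a t ih =>
    have ht := ih (fun x hx => h x (List.mem_cons_of_mem _ hx))
    by_cases hq : q a = true
    · simp only [List.filter_cons, hq, h a (List.mem_cons_self ..) hq, if_pos, List.length_cons]
      omega
    · simp only [List.filter_cons]
      rw [if_neg (by simp [hq])]
      split <;> (try simp only [List.length_cons]) <;> omega
-- … and strictly if additionally some list element flips from true to false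
lemma pvFilterLenLt (l : List String) (p q : String → Bool)
    (h : ∀ x ∈ l, q x = true → p x = true)
    (x : String) (hx : x ∈ l) (hpx : p x = true) (hqx : q x = false) :
    (l.filter q).length < (l.filter p).length := by
  induction l with
  | nil => simp at hx
  | cons a t ih =>
    have ht := pvFilterLenLe t p q (fun y hy => h y (List.mem_cons_of_mem _ hy))
    rcases List.mem_cons.mp hx with rfl | hxt
    · simp only [List.filter_cons, hpx, if_pos]
      rw [if_neg (by simp [hqx])]
      simp only [List.length_cons]
      omega
    · have hlt := ih (fun y hy => h y (List.mem_cons_of_mem _ hy)) hxt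
      by_cases hq : q a = true
      · simp only [List.filter_cons, hq, h a (List.mem_cons_self ..) hq, if_pos, List.length_cons]
        omega
      · simp only [List.filter_cons]
        rw [if_neg (by simp [hq])]
        split <;> (try simp only [List.length_cons]) <;> omega
-- number of known group names not yet in the set e (termination measure of both loops)
def pvMiss (e : PySem.Set String) : Nat :=
  (pvORDER.filter (fun k => !(PySem.Set.contains e k))).length

lemma pvMiss_add_lt (e : PySem.Set String) (d : String) (hd : d ∈ pvORDER) (hne : d ∉ e) :
    pvMiss (PySem.Set.add e d) < pvMiss e := by
  refine pvFilterLenLt pvORDER _ _ ?_ d hd ?_ ?_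
  · intro x _ hq
    simp only [Bool.not_eq_true'] at hq ⊢
    rcases hce : PySem.Set.contains e x with _ | _
    · rfl
    · exfalso
      have hx : x ∈ PySem.Set.add e d :=
        (PySem.Set.mem_add e d x).mpr (Or.inl ((PySem.Set.contains_iff e x).mp hce))
      rw [(PySem.Set.contains_iff _ x).mpr hx] at hq
      cases hq
  · simp only [Bool.not_eq_true']
    rcases hce : PySem.Set.contains e d with _ | _
    · rfl
    · exact absurd ((PySem.Set.contains_iff e d).mp hce) hne
  · rw [(PySem.Set.contains_iff _ d).mpr ((PySem.Set.mem_add e d d).mpr (Or.inr rfl))]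
    rfl
-- one iteration of the inner 'for dep in GROUP_DEPENDENCIES.get(group, [])' body of A
def pvStepA (st : PySem.Set String × PySem.Set String × Bool) (dep : String) :
    PySem.Set String × PySem.Set String × Bool :=
  if PySem.Set.contains st.1 dep then st
  else (PySem.Set.add st.1 dep, PySem.Set.add st.2.1 dep, true)

lemma pvStepA_pos {st : PySem.Set String × PySem.Set String × Bool} {dep : String}
    (hc : PySem.Set.contains st.1 dep = true) : pvStepA st dep = st := by
  have hm : dep ∈ st.1 := (PySem.Set.contains_iff _ _).mp hc
  unfold pvStepA; simp [hm]

lemma pvStepA_neg {st : PySem.Set String × PySem.Set String × Bool} {dep : String}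
    (hc : PySem.Set.contains st.1 dep = false) :
    pvStepA st dep = (PySem.Set.add st.1 dep, PySem.Set.add st.2.1 dep, true) := by
  have hm : dep ∉ st.1 := fun h => by rw [(PySem.Set.contains_iff _ _).mpr h] at hc; cases hc
  unfold pvStepA; simp [hm]

-- one 'for group in list(expanded)' sweep of A's while-loop body over the snapshot
def pvPassA (snapshot : List String)
    (st : PySem.Set String × PySem.Set String × Bool) :
    PySem.Set String × PySem.Set String × Bool :=
  snapshot.foldl (fun st group => (pvDeps group).foldl pvStepA st) st

-- the inner fold of one group: set grows, measure never grows, a change shrinks it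
lemma pvInnerA_measure (deps : List String) (hd : ∀ x ∈ deps, x ∈ pvORDER) :
    ∀ st : PySem.Set String × PySem.Set String × Bool,
    (∀ x, x ∈ st.1 → x ∈ (deps.foldl pvStepA st).1) ∧
    pvMiss (deps.foldl pvStepA st).1 ≤ pvMiss st.1 ∧
    ((deps.foldl pvStepA st).2.2 = true →
      st.2.2 = true ∨ pvMiss (deps.foldl pvStepA st).1 < pvMiss st.1) := by
  induction deps with
  | nil => intro st; exact ⟨fun x h => h, le_refl _, fun h => Or.inl h⟩
  | cons dep rest ih =>
    intro st
    have hdrest : ∀ x ∈ rest, x ∈ pvORDER := fun x hx => hd x (List.mem_cons_of_mem _ hx)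
    rcases hc : PySem.Set.contains st.1 dep with _ | _
    · rw [List.foldl_cons, pvStepA_neg hc]
      rcases ih hdrest (PySem.Set.add st.1 dep, PySem.Set.add st.2.1 dep, true) with ⟨hmem, hle, -⟩
      have hnm : dep ∉ st.1 := fun hmemd => by
        rw [(PySem.Set.contains_iff _ _).mpr hmemd] at hc; cases hc
      have hdadd : pvMiss (PySem.Set.add st.1 dep) < pvMiss st.1 :=
        pvMiss_add_lt st.1 dep (hd dep (List.mem_cons_self ..)) hnm
      exact ⟨fun x hx => hmem x ((PySem.Set.mem_add _ _ _).mpr (Or.inl hx)),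
             le_of_lt (lt_of_le_of_lt hle hdadd),
             fun _ => Or.inr (lt_of_le_of_lt hle hdadd)⟩
    · rw [List.foldl_cons, pvStepA_pos hc]
      exact ih hdrest st

-- the sweep only grows the set, never increases the measure, and any change strictly shrinks it
lemma pvPassA_measure (snapshot : List String) :
    ∀ st : PySem.Set String × PySem.Set String × Bool,
    (∀ x, x ∈ st.1 → x ∈ (pvPassA snapshot st).1) ∧
    pvMiss (pvPassA snapshot st).1 ≤ pvMiss st.1 ∧
    ((pvPassA snapshot st).2.2 = true → st.2.2 = true ∨ pvMiss (pvPassA snapshot st).1 < pvMiss st.1) := by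
  induction snapshot with
  | nil => intro st; exact ⟨fun x h => h, le_refl _, fun h => Or.inl h⟩
  | cons g rest ih =>
    intro st
    rcases pvInnerA_measure (pvDeps g) (fun x hx => pvDeps_subset_order g x hx) st with ⟨hm1, hl1, hc1⟩
    rcases ih ((pvDeps g).foldl pvStepA st) with ⟨hm2, hl2, hc2⟩
    refine ⟨fun x hx => hm2 x (hm1 x hx), le_trans hl2 hl1, fun hch => ?_⟩
    rcases hc2 hch with h' | h'
    · rcases hc1 h' with h'' | h''
      · exact Or.inl h''
      · exact Or.inr (lt_of_le_of_lt hl2 h'')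
    · exact Or.inr (lt_of_lt_of_le h' hl1)

-- A's 'while changed' loop
def pvLoopA (e d : PySem.Set String) : PySem.Set String × PySem.Set String :=
  let r := pvPassA e (e, d, false)
  if h : r.2.2 = true then pvLoopA r.1 r.2.1 else (r.1, r.2.1)
termination_by pvMiss e
decreasing_by
  rcases pvPassA_measure e (e, d, false) with ⟨-, -, hch⟩
  rcases hch h with h' | h'
  · exact absurd h' (by simp)
  · exact h'

def expand_dependencies_py (groups : List String) : List String × List String :=
  let r := pvLoopA (PySem.Set.ofList groups) PySem.Set.empty
  (pvORDER.filter (fun g => PySem.Set.contains r.1 g),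
   pvORDER.filter (fun g => PySem.Set.contains r.2 g && !(groups.contains g)))

-- ===== PORT B =====
-- one iteration of B's 'for dep in GROUP_DEPENDENCIES.get(node, [])' body
def pvPushB (st : PySem.Set String × List String × List String) (dep : String) :
    PySem.Set String × List String × List String :=
  if PySem.Set.contains st.1 dep then st
  else (PySem.Set.add st.1 dep, st.2.1 ++ [dep], dep :: st.2.2)

lemma pvPushB_pos {st : PySem.Set String × List String × List String} {dep : String}
    (hc : PySem.Set.contains st.1 dep = true) : pvPushB st dep = st := by
  have hm : dep ∈ st.1 := (PySem.Set.contains_iff _ _).mp hc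
  unfold pvPushB; simp [hm]

lemma pvPushB_neg {st : PySem.Set String × List String × List String} {dep : String}
    (hc : PySem.Set.contains st.1 dep = false) :
    pvPushB st dep = (PySem.Set.add st.1 dep, st.2.1 ++ [dep], dep :: st.2.2) := by
  have hm : dep ∉ st.1 := fun h => by rw [(PySem.Set.contains_iff _ _).mpr h] at hc; cases hc
  unfold pvPushB; simp [hm]

-- process the popped node: scan its dependencies, adding new ones to the set, the added list and the stack
def pvStepB (node : String)
    (st : PySem.Set String × List String × List String) :
    PySem.Set String × List String × List String :=
  (pvDeps node).foldl pvPushB st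

-- processing one node never increases the combined measure (stack size + 2·missing known names)
lemma pvStepB_measure_aux (deps : List String) (hd : ∀ x ∈ deps, x ∈ pvORDER) :
    ∀ st : PySem.Set String × List String × List String,
    (deps.foldl pvPushB st).2.2.length + 2 * pvMiss (deps.foldl pvPushB st).1 ≤
      st.2.2.length + 2 * pvMiss st.1 := by
  induction deps with
  | nil => intro st; exact le_refl _
  | cons dep rest ih =>
    intro st
    have hdrest : ∀ x ∈ rest, x ∈ pvORDER := fun x hx => hd x (List.mem_cons_of_mem _ hx)
    rcases hc : PySem.Set.contains st.1 dep with _ | _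
    · rw [List.foldl_cons, pvPushB_neg hc]
      have hrec := ih hdrest (PySem.Set.add st.1 dep, st.2.1 ++ [dep], dep :: st.2.2)
      have hnm : dep ∉ st.1 := fun hmemd => by
        rw [(PySem.Set.contains_iff _ _).mpr hmemd] at hc; cases hc
      have hdadd : pvMiss (PySem.Set.add st.1 dep) < pvMiss st.1 :=
        pvMiss_add_lt st.1 dep (hd dep (List.mem_cons_self ..)) hnm
      simp only [List.length_cons] at hrec
      omega
    · rw [List.foldl_cons, pvPushB_pos hc]
      exact ih hdrest st

lemma pvStepB_measure (node : String)
    (st : PySem.Set String × List String × List String) :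
    (pvStepB node st).2.2.length + 2 * pvMiss (pvStepB node st).1 ≤
      st.2.2.length + 2 * pvMiss st.1 :=
  pvStepB_measure_aux (pvDeps node) (fun x hx => pvDeps_subset_order node x hx) st

-- B's worklist loop; the Lean stack list is Python's list reversed (pop() = head, append = cons)
def pvLoopB (e : PySem.Set String) (added stack : List String) :
    PySem.Set String × List String :=
  match stack with
  | [] => (e, added)
  | node :: rest =>
    let r := pvStepB node (e, added, rest)
    pvLoopB r.1 r.2.1 r.2.2
termination_by stack.length + 2 * pvMiss e
decreasing_by
  have h := pvStepB_measure node (e, added, rest)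
  simp only [] at h
  simp only [List.length_cons]
  omega

def expand_dependencies_py_alt (groups : List String) : List String × List String :=
  let r := pvLoopB (PySem.Set.ofList groups) [] groups.reverse
  (pvORDER.filter (fun g => PySem.Set.contains r.1 g),
   pvORDER.filter (fun g => r.2.contains g && !(groups.contains g)))

-- ===== PRECONDITION & SPEC =====
def Spec_expand_dependencies_py (groups : List String) (out : List String × List String) : Prop := out = expand_dependencies_py_alt groups
instance (groups : List String) (out : List String × List String) : Decidable (Spec_expand_dependencies_py groups out) := by unfold Spec_expand_dependencies_py; infer_instance

-- ===== CLAIM (what is proved, stated in full; the proofs are below) =====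
def Claim_equal_expand_dependencies_py : Prop := ∀ (groups : List String), Dom_expand_dependencies_py groups → Spec_expand_dependencies_py groups (expand_dependencies_py groups)

-- ===== LEMMAS AND PROOFS =====

-- the dependency closure of `groups`: what both loops compute, as an inductive predicate
inductive pvReach (groups : List String) : String → Prop
| base {x : String} : x ∈ groups → pvReach groups x
| step {x d : String} : pvReach groups x → d ∈ pvDeps x → pvReach groups d

-- any superset of groups closed under pvDeps contains the whole closure
lemma pvReach_mem (groups : List String) (E : List String)
    (hg : ∀ x ∈ groups, x ∈ E) (hcl : ∀ x ∈ E, ∀ d ∈ pvDeps x, d ∈ E) :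
    ∀ x, pvReach groups x → x ∈ E := by
  intro x hx
  induction hx with
  | base h => exact hg _ h
  | step hr hd ih => exact hcl _ ih _ hd

-- invariant carried by A's loop state (expanded, dependency_only)
def pvInvA (groups : List String) (e d : PySem.Set String) : Prop :=
  (∀ x ∈ groups, x ∈ e) ∧ (∀ x ∈ e, pvReach groups x) ∧
  (∀ x ∈ d, x ∈ e ∧ x ∉ groups) ∧ (∀ x ∈ e, x ∈ groups ∨ x ∈ d)

-- the inner fold of A preserves the invariant
lemma pvInnerA_inv (groups : List String) (g : String) (hg : pvReach groups g)
    (deps : List String) (hdeps : ∀ x ∈ deps, x ∈ pvDeps g) :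
    ∀ st : PySem.Set String × PySem.Set String × Bool,
    pvInvA groups st.1 st.2.1 →
    pvInvA groups (deps.foldl pvStepA st).1 (deps.foldl pvStepA st).2.1 := by
  induction deps with
  | nil => exact fun st h => h
  | cons dep rest ih =>
    intro st hinv
    have hdrest : ∀ x ∈ rest, x ∈ pvDeps g := fun x hx => hdeps x (List.mem_cons_of_mem _ hx)
    rcases hc : PySem.Set.contains st.1 dep with _ | _
    · rw [List.foldl_cons, pvStepA_neg hc]
      refine ih hdrest _ ?_
      obtain ⟨h1, h2, h3, h4⟩ := hinv
      have hnm : dep ∉ st.1 := fun h => by rw [(PySem.Set.contains_iff _ _).mpr h] at hc; cases hc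
      have hdreach : pvReach groups dep := pvReach.step hg (hdeps dep (List.mem_cons_self ..))
      have hdng : dep ∉ groups := fun h => hnm (h1 dep h)
      refine ⟨fun x hx => (PySem.Set.mem_add _ _ _).mpr (Or.inl (h1 x hx)), ?_, ?_, ?_⟩
      · intro x hx
        rcases (PySem.Set.mem_add _ _ _).mp hx with hx' | rfl
        · exact h2 x hx'
        · exact hdreach
      · intro x hx
        rcases (PySem.Set.mem_add _ _ _).mp hx with hx' | rfl
        · exact ⟨(PySem.Set.mem_add _ _ _).mpr (Or.inl (h3 x hx').1), (h3 x hx').2⟩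
        · exact ⟨(PySem.Set.mem_add _ _ _).mpr (Or.inr rfl), hdng⟩
      · intro x hx
        rcases (PySem.Set.mem_add _ _ _).mp hx with hx' | rfl
        · rcases h4 x hx' with h' | h'
          · exact Or.inl h'
          · exact Or.inr ((PySem.Set.mem_add _ _ _).mpr (Or.inl h'))
        · exact Or.inr ((PySem.Set.mem_add _ _ _).mpr (Or.inr rfl))
    · rw [List.foldl_cons, pvStepA_pos hc]
      exact ih hdrest st hinv

-- a whole sweep preserves the invariant (the snapshot holds reachable elements only)
lemma pvPassA_inv (groups : List String) (snapshot : List String)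
    (hs : ∀ g ∈ snapshot, pvReach groups g) :
    ∀ st : PySem.Set String × PySem.Set String × Bool,
    pvInvA groups st.1 st.2.1 →
    pvInvA groups (pvPassA snapshot st).1 (pvPassA snapshot st).2.1 := by
  induction snapshot with
  | nil => exact fun st h => h
  | cons g rest ih =>
    intro st hinv
    have hsrest : ∀ x ∈ rest, pvReach groups x := fun x hx => hs x (List.mem_cons_of_mem _ hx)
    exact ih hsrest _
      (pvInnerA_inv groups g (hs g (List.mem_cons_self ..)) (pvDeps g) (fun x hx => hx) st hinv)

-- the changed flag is never reset inside a sweep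
lemma pvInnerA_sticky (deps : List String) :
    ∀ st : PySem.Set String × PySem.Set String × Bool,
    st.2.2 = true → (deps.foldl pvStepA st).2.2 = true := by
  induction deps with
  | nil => exact fun st h => h
  | cons dep rest ih =>
    intro st hst
    rcases hc : PySem.Set.contains st.1 dep with _ | _
    · rw [List.foldl_cons, pvStepA_neg hc]; exact ih _ rfl
    · rw [List.foldl_cons, pvStepA_pos hc]; exact ih st hst

-- a sweep that reports no change did nothing, and the state was already closed on the snapshot
lemma pvInnerA_false (deps : List String) :
    ∀ st : PySem.Set String × PySem.Set String × Bool,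
    (deps.foldl pvStepA st).2.2 = false →
    deps.foldl pvStepA st = st ∧ ∀ dep ∈ deps, PySem.Set.contains st.1 dep = true := by
  induction deps with
  | nil => exact fun st _ => ⟨rfl, by simp⟩
  | cons dep rest ih =>
    intro st hf
    rcases hc : PySem.Set.contains st.1 dep with _ | _
    · rw [List.foldl_cons, pvStepA_neg hc] at hf
      rw [pvInnerA_sticky rest _ rfl] at hf
      cases hf
    · rw [List.foldl_cons, pvStepA_pos hc] at hf ⊢
      rcases ih st hf with ⟨heq, hall⟩
      refine ⟨heq, fun x hx => ?_⟩
      rcases List.mem_cons.mp hx with rfl | hx'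
      · exact hc
      · exact hall x hx'

lemma pvPassA_false (snapshot : List String) :
    ∀ st : PySem.Set String × PySem.Set String × Bool,
    (pvPassA snapshot st).2.2 = false →
    pvPassA snapshot st = st ∧
    ∀ g ∈ snapshot, ∀ dep ∈ pvDeps g, PySem.Set.contains st.1 dep = true := by
  induction snapshot with
  | nil => exact fun st _ => ⟨rfl, by simp⟩
  | cons g rest ih =>
    intro st hf
    have hf' : (pvPassA rest ((pvDeps g).foldl pvStepA st)).2.2 = false := hf
    rcases ih _ hf' with ⟨heq2, hall2⟩
    have hinnerflag : ((pvDeps g).foldl pvStepA st).2.2 = false := by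
      rw [← heq2]; exact hf'
    rcases pvInnerA_false (pvDeps g) st hinnerflag with ⟨heq1, hall1⟩
    constructor
    · show pvPassA rest ((pvDeps g).foldl pvStepA st) = st
      rw [heq1] at heq2 ⊢
      exact heq2
    · intro g' hg' dep hdep
      rcases List.mem_cons.mp hg' with rfl | hg''
      · exact hall1 dep hdep
      · have := hall2 g' hg'' dep hdep
        rw [heq1] at this
        exact this

-- running A's while-loop from an invariant state yields an invariant, closed state
lemma pvLoopA_spec (groups : List String) :
    ∀ e d : PySem.Set String, pvInvA groups e d →
    pvInvA groups (pvLoopA e d).1 (pvLoopA e d).2 ∧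
    (∀ x ∈ (pvLoopA e d).1, ∀ dep ∈ pvDeps x, dep ∈ (pvLoopA e d).1) := by
  intro e d
  induction e, d using pvLoopA.induct with
  | case1 e d r hch ih =>
    intro hinv
    rw [pvLoopA, dif_pos hch]
    exact ih (pvPassA_inv groups e (fun g hg => hinv.2.1 g hg) (e, d, false) hinv)
  | case2 e d r hch =>
    intro hinv
    rw [pvLoopA, dif_neg hch]
    have hfalse : (pvPassA e (e, d, false)).2.2 = false := by
      rcases h : (pvPassA e (e, d, false)).2.2 with _ | _
      · rfl
      · exact absurd h hch
    rcases pvPassA_false e (e, d, false) hfalse with ⟨heq, hclosed⟩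
    rw [heq]
    refine ⟨hinv, fun x hx dep hdep => ?_⟩
    exact (PySem.Set.contains_iff _ _).mp (hclosed x hx dep hdep)

-- characterisation of A's final state: expanded = the closure, dependency_only = closure minus groups
lemma pvLoopA_char (groups : List String) :
    (∀ x, x ∈ (pvLoopA (PySem.Set.ofList groups) PySem.Set.empty).1 ↔ pvReach groups x) ∧
    (∀ x, x ∈ (pvLoopA (PySem.Set.ofList groups) PySem.Set.empty).2 ↔
      (pvReach groups x ∧ x ∉ groups)) := by
  have hinit : pvInvA groups (PySem.Set.ofList groups) PySem.Set.empty := by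
    refine ⟨fun x hx => (PySem.Set.mem_ofList _ _).mpr hx,
            fun x hx => pvReach.base ((PySem.Set.mem_ofList _ _).mp hx),
            fun x hx => absurd hx (List.not_mem_nil),
            fun x hx => Or.inl ((PySem.Set.mem_ofList _ _).mp hx)⟩
  rcases pvLoopA_spec groups _ _ hinit with ⟨⟨h1, h2, h3, h4⟩, hcl⟩
  have hfull : ∀ x, pvReach groups x → x ∈ (pvLoopA (PySem.Set.ofList groups) PySem.Set.empty).1 :=
    pvReach_mem groups _ h1 hcl
  constructor
  · exact fun x => ⟨h2 x, hfull x⟩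
  · intro x
    constructor
    · intro hx
      rcases h3 x hx with ⟨hxe, hxg⟩
      exact ⟨h2 x hxe, hxg⟩
    · rintro ⟨hr, hng⟩
      rcases h4 x (hfull x hr) with h' | h'
      · exact absurd h' hng
      · exact h'

-- invariant carried by B's loop state (expanded, added, stack)
def pvInvB (groups : List String) (e : PySem.Set String) (added stack : List String) : Prop :=
  (∀ x ∈ groups, x ∈ e) ∧ (∀ x ∈ e, pvReach groups x) ∧
  (∀ x ∈ added, x ∈ e ∧ x ∉ groups) ∧ (∀ x ∈ e, x ∈ groups ∨ x ∈ added) ∧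
  (∀ x ∈ stack, x ∈ e) ∧ (∀ x ∈ e, x ∈ stack ∨ ∀ dep ∈ pvDeps x, dep ∈ e)

-- B's invariant while the popped node is being processed (node is neither on the stack nor closed yet)
def pvInvBnode (groups : List String) (node : String)
    (st : PySem.Set String × List String × List String) : Prop :=
  (∀ x ∈ groups, x ∈ st.1) ∧ (∀ x ∈ st.1, pvReach groups x) ∧
  (∀ x ∈ st.2.1, x ∈ st.1 ∧ x ∉ groups) ∧ (∀ x ∈ st.1, x ∈ groups ∨ x ∈ st.2.1) ∧
  (∀ x ∈ st.2.2, x ∈ st.1) ∧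
  (∀ x ∈ st.1, x = node ∨ x ∈ st.2.2 ∨ ∀ dep ∈ pvDeps x, dep ∈ st.1)

-- the dependency scan of the popped node preserves the invariant and puts all scanned deps into the set
lemma pvPushB_inv (groups : List String) (node : String) (hnode : pvReach groups node)
    (deps : List String) (hdeps : ∀ x ∈ deps, x ∈ pvDeps node) :
    ∀ st : PySem.Set String × List String × List String,
    pvInvBnode groups node st →
    pvInvBnode groups node (deps.foldl pvPushB st) ∧
    (∀ d ∈ deps, d ∈ (deps.foldl pvPushB st).1) ∧
    (∀ x ∈ st.1, x ∈ (deps.foldl pvPushB st).1) := by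
  induction deps with
  | nil => exact fun st h => ⟨h, by simp, fun x hx => hx⟩
  | cons dep rest ih =>
    intro st hinv
    have hdrest : ∀ x ∈ rest, x ∈ pvDeps node := fun x hx => hdeps x (List.mem_cons_of_mem _ hx)
    rcases hc : PySem.Set.contains st.1 dep with _ | _
    · rw [List.foldl_cons, pvPushB_neg hc]
      obtain ⟨h1, h2, h3, h4, h5, h6⟩ := hinv
      have hnm : dep ∉ st.1 := fun h => by rw [(PySem.Set.contains_iff _ _).mpr h] at hc; cases hc
      have hdreach : pvReach groups dep := pvReach.step hnode (hdeps dep (List.mem_cons_self ..))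
      have hdng : dep ∉ groups := fun h => hnm (h1 dep h)
      have hinv' : pvInvBnode groups node (PySem.Set.add st.1 dep, st.2.1 ++ [dep], dep :: st.2.2) := by
        refine ⟨fun x hx => (PySem.Set.mem_add _ _ _).mpr (Or.inl (h1 x hx)), ?_, ?_, ?_, ?_, ?_⟩
        · intro x hx
          rcases (PySem.Set.mem_add _ _ _).mp hx with hx' | rfl
          · exact h2 x hx'
          · exact hdreach
        · intro x hx
          rcases List.mem_append.mp hx with hx' | hx'
          · exact ⟨(PySem.Set.mem_add _ _ _).mpr (Or.inl (h3 x hx').1), (h3 x hx').2⟩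
          · rw [List.mem_singleton.mp hx']
            exact ⟨(PySem.Set.mem_add _ _ _).mpr (Or.inr rfl), hdng⟩
        · intro x hx
          rcases (PySem.Set.mem_add _ _ _).mp hx with hx' | rfl
          · rcases h4 x hx' with h' | h'
            · exact Or.inl h'
            · exact Or.inr (List.mem_append.mpr (Or.inl h'))
          · exact Or.inr (List.mem_append.mpr (Or.inr (List.mem_singleton.mpr rfl)))
        · intro x hx
          rcases List.mem_cons.mp hx with rfl | hx'
          · exact (PySem.Set.mem_add _ _ _).mpr (Or.inr rfl)
          · exact (PySem.Set.mem_add _ _ _).mpr (Or.inl (h5 x hx'))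
        · intro x hx
          rcases (PySem.Set.mem_add _ _ _).mp hx with hx' | rfl
          · rcases h6 x hx' with h' | h' | h'
            · exact Or.inl h'
            · exact Or.inr (Or.inl (List.mem_cons_of_mem _ h'))
            · exact Or.inr (Or.inr (fun d hd => (PySem.Set.mem_add _ _ _).mpr (Or.inl (h' d hd))))
          · exact Or.inr (Or.inl (List.mem_cons_self ..))
      rcases ih hdrest _ hinv' with ⟨hres, hdres, hmono⟩
      refine ⟨hres, ?_, ?_⟩
      · intro d hd
        rcases List.mem_cons.mp hd with rfl | hd'
        · exact hmono d ((PySem.Set.mem_add _ _ _).mpr (Or.inr rfl))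
        · exact hdres d hd'
      · exact fun x hx => hmono x ((PySem.Set.mem_add _ _ _).mpr (Or.inl hx))
    · rw [List.foldl_cons, pvPushB_pos hc]
      rcases ih hdrest st hinv with ⟨hres, hdres, hmono⟩
      refine ⟨hres, ?_, hmono⟩
      intro d hd
      rcases List.mem_cons.mp hd with rfl | hd'
      · exact hmono d ((PySem.Set.contains_iff _ _).mp hc)
      · exact hdres d hd'

-- running B's worklist loop from an invariant state yields the closure and its added list
lemma pvLoopB_spec (groups : List String) :
    ∀ (e : PySem.Set String) (added stack : List String), pvInvB groups e added stack →
    (∀ x ∈ groups, x ∈ (pvLoopB e added stack).1) ∧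
    (∀ x ∈ (pvLoopB e added stack).1, pvReach groups x) ∧
    (∀ x ∈ (pvLoopB e added stack).2, x ∈ (pvLoopB e added stack).1 ∧ x ∉ groups) ∧
    (∀ x ∈ (pvLoopB e added stack).1, x ∈ groups ∨ x ∈ (pvLoopB e added stack).2) ∧
    (∀ x ∈ (pvLoopB e added stack).1, ∀ dep ∈ pvDeps x, dep ∈ (pvLoopB e added stack).1) := by
  intro e added stack
  induction e, added, stack using pvLoopB.induct with
  | case1 e added =>
    rintro ⟨h1, h2, h3, h4, h5, h6⟩
    rw [pvLoopB]
    refine ⟨h1, h2, h3, h4, fun x hx dep hdep => ?_⟩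
    rcases h6 x hx with h' | h'
    · exact absurd h' (List.not_mem_nil)
    · exact h' dep hdep
  | case2 e added node rest r ih =>
    rintro ⟨h1, h2, h3, h4, h5, h6⟩
    rw [pvLoopB]
    have hnode : pvReach groups node := h2 node (h5 node (List.mem_cons_self ..))
    have hpre : pvInvBnode groups node (e, added, rest) := by
      refine ⟨h1, h2, h3, h4, fun x hx => h5 x (List.mem_cons_of_mem _ hx), ?_⟩
      intro x hx
      rcases h6 x hx with h' | h'
      · rcases List.mem_cons.mp h' with rfl | h''
        · exact Or.inl rfl
        · exact Or.inr (Or.inl h'')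
      · exact Or.inr (Or.inr h')
    rcases pvPushB_inv groups node hnode (pvDeps node) (fun x hx => hx) (e, added, rest) hpre
      with ⟨⟨g1, g2, g3, g4, g5, g6⟩, gdeps, gmono⟩
    have hnext : pvInvB groups (pvStepB node (e, added, rest)).1
        (pvStepB node (e, added, rest)).2.1 (pvStepB node (e, added, rest)).2.2 := by
      refine ⟨g1, g2, g3, g4, g5, ?_⟩
      intro x hx
      rcases g6 x hx with rfl | h' | h'
      · exact Or.inr gdeps
      · exact Or.inl h'
      · exact Or.inr h'
    exact ih hnext

-- characterisation of B's final state
lemma pvLoopB_char (groups : List String) :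
    (∀ x, x ∈ (pvLoopB (PySem.Set.ofList groups) [] groups.reverse).1 ↔ pvReach groups x) ∧
    (∀ x, x ∈ (pvLoopB (PySem.Set.ofList groups) [] groups.reverse).2 ↔
      (pvReach groups x ∧ x ∉ groups)) := by
  have hinit : pvInvB groups (PySem.Set.ofList groups) [] groups.reverse := by
    refine ⟨fun x hx => (PySem.Set.mem_ofList _ _).mpr hx,
            fun x hx => pvReach.base ((PySem.Set.mem_ofList _ _).mp hx),
            fun x hx => absurd hx (List.not_mem_nil),
            fun x hx => Or.inl ((PySem.Set.mem_ofList _ _).mp hx),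
            fun x hx => (PySem.Set.mem_ofList _ _).mpr (List.mem_reverse.mp hx),
            fun x hx => Or.inl (List.mem_reverse.mpr ((PySem.Set.mem_ofList _ _).mp hx))⟩
  rcases pvLoopB_spec groups _ _ _ hinit with ⟨h1, h2, h3, h4, hcl⟩
  have hfull : ∀ x, pvReach groups x → x ∈ (pvLoopB (PySem.Set.ofList groups) [] groups.reverse).1 :=
    pvReach_mem groups _ h1 hcl
  constructor
  · exact fun x => ⟨h2 x, hfull x⟩
  · intro x
    constructor
    · intro hx
      rcases h3 x hx with ⟨hxe, hxg⟩
      exact ⟨h2 x hxe, hxg⟩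
    · rintro ⟨hr, hng⟩
      rcases h4 x (hfull x hr) with h' | h'
      · exact absurd h' hng
      · exact h'

-- ===== VERDICT (by name: the statement is the Claim_ definition above) =====
theorem expand_dependencies_py_spec : Claim_equal_expand_dependencies_py := by
  intro groups _
  unfold Spec_expand_dependencies_py expand_dependencies_py expand_dependencies_py_alt
  rcases pvLoopA_char groups with ⟨ha1, ha2⟩
  rcases pvLoopB_char groups with ⟨hb1, hb2⟩
  refine Prod.ext ?_ ?_
  · change List.filter _ _ = List.filter _ _
    apply List.filter_congr
    intro g _
    rw [Bool.eq_iff_iff, PySem.Set.contains_iff, PySem.Set.contains_iff, ha1, hb1]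
  · change List.filter _ _ = List.filter _ _
    apply List.filter_congr
    intro g _
    rw [Bool.eq_iff_iff]
    simp only [Bool.and_eq_true, Bool.not_eq_true', PySem.Set.contains_iff,
      List.contains_iff_mem, ha2, hb2]
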